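-- pv_equiv track=rewrite | github.com/espressif/esp-technical-reference-manual-latex | tools/auto_backport/check_needs_backport.py | modification_triggers_backport
-- ===== SOURCE A (Python) =====
-- def normalize_modified_path(p: str) -> str:
--     p = p.replace("\\", "/")
--     return p if p.startswith("./") else "./" + p
--
-- def modification_triggers_backport(modified: str, reused_paths: set[str]) -> bool:
--     """
--     True if modified path matches a listed .tex file, or is under a listed module folder,
--     or is the root __CN/__EN .tex for that module (e.g. ./ESP32-C5/02-RISCVTRACENC__CN.tex).
--     """
--     m = normalize_modified_path(modified)
--     if m in reused_paths:
--         return True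
--     for entry in reused_paths:
--         if entry.endswith(".tex"):
--             continue
--         if m == entry + "__CN.tex" or m == entry + "__EN.tex":
--             return True
--         prefix = entry.rstrip("/") + "/"
--         if m.startswith(prefix):
--             return True
--     return False
-- ===== SOURCE B (Python) =====
-- def modification_triggers_backport(modified: str, reused_paths: set[str]) -> bool:
--     m = modified.replace("\\", "/")
--     if not m.startswith("./"):
--         m = "./" + m
--     if m in reused_paths:
--         return True
--     # hash set of slash-stripped non-.tex entries, built once
--     dirs = {e.rstrip("/") for e in reused_paths if not e.endswith(".tex")}
--     # is some ancestor prefix of m a listed module folder?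
--     for i, c in enumerate(m):
--         if c == "/" and m[:i] in dirs:
--             return True
--     # is m the root __CN/__EN .tex of a listed module folder?
--     if m.endswith("__CN.tex") or m.endswith("__EN.tex"):
--         stem = m[:-8]
--         if stem in reused_paths and not stem.endswith(".tex"):
--             return True
--     return False
-- ===== Notes on version B (the rewrite author's own statement) =====
-- stated objective: alternative
-- what changed: Instead of scanning every entry and string-comparing m against entry-derived prefixes and CN/EN names, B builds one set of stripped non-.tex entries and probes m's own ancestor prefixes and its CN/EN-stripped stem against it.
import Mathlib
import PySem

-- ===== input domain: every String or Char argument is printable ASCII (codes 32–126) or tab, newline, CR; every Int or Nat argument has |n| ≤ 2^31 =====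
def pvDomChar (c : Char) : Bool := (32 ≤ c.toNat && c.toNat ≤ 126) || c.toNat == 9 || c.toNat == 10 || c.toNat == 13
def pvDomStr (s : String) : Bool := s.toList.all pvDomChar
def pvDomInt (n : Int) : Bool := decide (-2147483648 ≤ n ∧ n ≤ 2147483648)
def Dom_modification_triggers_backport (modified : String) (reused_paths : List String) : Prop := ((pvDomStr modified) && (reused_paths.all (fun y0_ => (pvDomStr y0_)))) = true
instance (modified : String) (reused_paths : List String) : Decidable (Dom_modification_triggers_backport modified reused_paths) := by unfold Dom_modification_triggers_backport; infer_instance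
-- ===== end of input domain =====

-- B replaces A's per-entry comparison scan by one prebuilt set of stripped non-.tex entries,
-- probed with m's ancestor prefixes and its CN/EN-stripped stem (objective: alternative; same measured cost).
-- Ports work over List Char with PySem.Chars (exact on the ASCII domain).

-- ===== PORT A =====
-- s.rstrip("/") : drop trailing '/' characters (exact for this single-char strip set)
def pvRstripSlash (cs : List Char) : List Char := cs.rdropWhile (· == '/')

def pvNormalize (p : List Char) : List Char :=
  let p := PySem.Chars.replace p "\\".toList "/".toList
  if PySem.Chars.startswith p "./".toList then p else "./".toList ++ p

-- the for-loop of A with its early returns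
def pvLoopA (m : List Char) : List (List Char) → Bool
  | [] => false
  | entry :: rest =>
    if PySem.Chars.endswith entry ".tex".toList then pvLoopA m rest
    else if (m == entry ++ "__CN.tex".toList) || (m == entry ++ "__EN.tex".toList) then true
    else if PySem.Chars.startswith m (pvRstripSlash entry ++ "/".toList) then true
    else pvLoopA m rest

def modification_triggers_backport (modified : String) (reused_paths : List String) : Bool :=
  let m := pvNormalize modified.toList
  if PySem.Set.contains (reused_paths.map String.toList) m then true
  else pvLoopA m (reused_paths.map String.toList)

-- ===== PORT B =====
-- the 'for i, c in enumerate(m)' loop of B with its early return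
def pvLoopB (m : List Char) (dirs : PySem.Set (List Char)) : List (Int × Char) → Bool
  | [] => false
  | (i, c) :: rest =>
    if (c == '/') && PySem.Set.contains dirs (PySem.Chars.slice m none (some i)) then true
    else pvLoopB m dirs rest

def modification_triggers_backport_alt (modified : String) (reused_paths : List String) : Bool :=
  let R := reused_paths.map String.toList
  let m0 := PySem.Chars.replace modified.toList "\\".toList "/".toList
  let m := if PySem.Chars.startswith m0 "./".toList then m0 else "./".toList ++ m0
  if PySem.Set.contains R m then true
  else
    let dirs := PySem.Set.ofList ((R.filter (fun e => !PySem.Chars.endswith e ".tex".toList)).map pvRstripSlash)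
    if pvLoopB m dirs (PySem.List.enumerate m 0) then true
    else if PySem.Chars.endswith m "__CN.tex".toList || PySem.Chars.endswith m "__EN.tex".toList then
      let stem := PySem.Chars.slice m none (some (-8))
      PySem.Set.contains R stem && !PySem.Chars.endswith stem ".tex".toList
    else false

-- ===== PRECONDITION & SPEC =====
def Spec_modification_triggers_backport (modified : String) (reused_paths : List String) (out : Bool) : Prop := out = modification_triggers_backport_alt modified reused_paths
instance (modified : String) (reused_paths : List String) (out : Bool) : Decidable (Spec_modification_triggers_backport modified reused_paths out) := by unfold Spec_modification_triggers_backport; infer_instance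

-- ===== CLAIM (what is proved, stated in full; the proofs are below) =====
def Claim_equal_modification_triggers_backport : Prop := ∀ (modified : String) (reused_paths : List String), Dom_modification_triggers_backport modified reused_paths → Spec_modification_triggers_backport modified reused_paths (modification_triggers_backport modified reused_paths)

-- ===== LEMMAS AND PROOFS =====

-- the predicate A's loop tests on each entry
def pvHitA (m entry : List Char) : Bool :=
  !PySem.Chars.endswith entry ".tex".toList &&
    ((m == entry ++ "__CN.tex".toList) || (m == entry ++ "__EN.tex".toList) ||
      PySem.Chars.startswith m (pvRstripSlash entry ++ "/".toList))

theorem pvLoopA_eq_any (m : List Char) (R : List (List Char)) :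
    pvLoopA m R = R.any (pvHitA m) := by
  induction R with
  | nil => rfl
  | cons e rest ih =>
    by_cases h1 : PySem.Chars.endswith e ".tex".toList <;>
      by_cases h2 : (m == e ++ "__CN.tex".toList) || (m == e ++ "__EN.tex".toList) <;>
        by_cases h3 : PySem.Chars.startswith m (pvRstripSlash e ++ "/".toList) <;>
          simp_all [pvLoopA, pvHitA]

theorem pvLoopB_eq_any (m : List Char) (dirs : PySem.Set (List Char)) (l : List (Int × Char)) :
    pvLoopB m dirs l =
      l.any (fun p => (p.2 == '/') && PySem.Set.contains dirs (PySem.Chars.slice m none (some p.1))) := by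
  induction l with
  | nil => rfl
  | cons p rest ih =>
    obtain ⟨i, c⟩ := p
    simp only [List.any_cons, ← ih, pvLoopB]
    cases ((c == '/') && PySem.Set.contains dirs (PySem.Chars.slice m none (some i))) <;> simp

-- ancestor-prefix characterization: some '/' position k of m with m.take k = s  ↔  s ++ "/" is a prefix of m
theorem pvTake_slash_iff (m s : List Char) :
    (∃ (k : Nat) (h : k < m.length), m[k] = '/' ∧ m.take k = s) ↔ (s ++ ['/']) <+: m := by
  constructor
  · rintro ⟨k, hk, hc, ht⟩
    have : m.take (k + 1) = s ++ ['/'] := by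
      rw [List.take_add_one, ht]
      simp [List.getElem?_eq_getElem hk, hc]
    rw [← this]
    exact List.take_prefix _ _
  · rintro ⟨t, ht⟩
    have hm : m = s ++ '/' :: t := by rw [← ht]; simp
    refine ⟨s.length, by simp [hm], ?_, ?_⟩
    · have h0 : m[s.length]? = some '/' := by
        rw [hm, List.getElem?_append_right le_rfl]
        simp
      obtain ⟨_, h1⟩ := List.getElem?_eq_some_iff.1 h0
      exact h1
    · rw [hm, List.take_append_of_le_length le_rfl, List.take_length]

-- m = e ++ suf  ↔  m ends with suf and its stem (m minus |suf| chars) is e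
theorem pvEndswith_stem (m e suf : List Char) :
    m = e ++ suf ↔ (suf <:+ m ∧ m.take (m.length - suf.length) = e) := by
  constructor
  · rintro rfl
    refine ⟨List.suffix_append e suf, ?_⟩
    rw [List.length_append, Nat.add_sub_cancel, List.take_append_of_le_length le_rfl]
    simp
  · rintro ⟨⟨u, hu⟩, ht⟩
    subst hu
    rw [List.length_append, Nat.add_sub_cancel, List.take_append_of_le_length le_rfl,
        List.take_length] at ht
    rw [ht]

-- A's loop hit on entry e, as a proposition
def pvHitP (m e : List Char) : Prop :=
  PySem.Chars.endswith e ".tex".toList = false ∧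
    (m = e ++ "__CN.tex".toList ∨ m = e ++ "__EN.tex".toList ∨
      PySem.Chars.startswith m (pvRstripSlash e ++ "/".toList) = true)

theorem pvHitA_iff (m e : List Char) : pvHitA m e = true ↔ pvHitP m e := by
  simp only [pvHitA, pvHitP, Bool.and_eq_true, Bool.or_eq_true, Bool.not_eq_true', beq_iff_eq]
  tauto

-- B's ancestor loop finds a hit iff some non-.tex entry's stripped form is a proper ancestor of m
theorem pvAnc_iff (m : List Char) (R : List (List Char)) :
    pvLoopB m (PySem.Set.ofList ((R.filter (fun e => !PySem.Chars.endswith e ".tex".toList)).map pvRstripSlash)) (PySem.List.enumerate m 0) = true ↔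
      ∃ e ∈ R, PySem.Chars.endswith e ".tex".toList = false ∧
        PySem.Chars.startswith m (pvRstripSlash e ++ "/".toList) = true := by
  rw [pvLoopB_eq_any, List.any_eq_true]
  constructor
  · rintro ⟨p, hp, hpred⟩
    rw [PySem.List.mem_enumerate_iff] at hp
    obtain ⟨k, hk, rfl⟩ := hp
    simp only [zero_add, Bool.and_eq_true, beq_iff_eq] at hpred
    obtain ⟨hc, hmem⟩ := hpred
    rw [PySem.Chars.slice_eq_listSlice, PySem.List.slice_to_natCast,
        PySem.Set.contains_iff, PySem.Set.mem_ofList, List.mem_map] at hmem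
    obtain ⟨e, he, hrs⟩ := hmem
    rw [List.mem_filter, Bool.not_eq_eq_eq_not, Bool.not_true] at he
    refine ⟨e, he.1, he.2, ?_⟩
    rw [PySem.Chars.startswith_iff, show ("/".toList : List Char) = ['/'] from rfl, hrs]
    exact (pvTake_slash_iff m (m.take k)).1 ⟨k, hk, hc, rfl⟩
  · rintro ⟨e, heR, hnt, hsw⟩
    rw [PySem.Chars.startswith_iff, show ("/".toList : List Char) = ['/'] from rfl] at hsw
    obtain ⟨k, hk, hc, ht⟩ := (pvTake_slash_iff m (pvRstripSlash e)).2 hsw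
    refine ⟨((k : Int), m[k]), ?_, ?_⟩
    · rw [PySem.List.mem_enumerate_iff]
      exact ⟨k, hk, by simp⟩
    · simp only [Bool.and_eq_true, beq_iff_eq]
      refine ⟨hc, ?_⟩
      rw [PySem.Chars.slice_eq_listSlice, PySem.List.slice_to_natCast,
          PySem.Set.contains_iff, PySem.Set.mem_ofList, List.mem_map]
      exact ⟨e, List.mem_filter.2 ⟨heR, by simpa using hnt⟩, ht.symm⟩

-- B's CN/EN stem test hits iff m is e ++ "__CN.tex"/"__EN.tex" for some listed non-.tex e
theorem pvCn_iff (m : List Char) (R : List (List Char)) :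
    (if PySem.Chars.endswith m "__CN.tex".toList || PySem.Chars.endswith m "__EN.tex".toList then
       PySem.Set.contains R (PySem.Chars.slice m none (some (-8))) &&
         !PySem.Chars.endswith (PySem.Chars.slice m none (some (-8))) ".tex".toList
     else false) = true ↔
      ∃ e ∈ R, PySem.Chars.endswith e ".tex".toList = false ∧
        (m = e ++ "__CN.tex".toList ∨ m = e ++ "__EN.tex".toList) := by
  have hslice : PySem.Chars.slice m none (some (-8)) = m.take (m.length - 8) := by
    rw [PySem.Chars.slice_eq_listSlice, PySem.List.slice_to_neg_ofNat m 8 (by omega)]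
  have hlenCN : ("__CN.tex".toList : List Char).length = 8 := rfl
  have hlenEN : ("__EN.tex".toList : List Char).length = 8 := rfl
  constructor
  · intro h
    split at h
    case isTrue hew =>
      rw [Bool.and_eq_true, Bool.not_eq_eq_eq_not, Bool.not_true, PySem.Set.contains_iff] at h
      obtain ⟨hmem, htex⟩ := h
      rw [hslice] at hmem htex
      refine ⟨m.take (m.length - 8), hmem, htex, ?_⟩
      rw [Bool.or_eq_true, PySem.Chars.endswith_iff, PySem.Chars.endswith_iff] at hew
      cases hew with
      | inl hsuf =>
        exact Or.inl ((pvEndswith_stem m (m.take (m.length - 8)) _).2 ⟨hsuf, by rw [hlenCN]⟩)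
      | inr hsuf =>
        exact Or.inr ((pvEndswith_stem m (m.take (m.length - 8)) _).2 ⟨hsuf, by rw [hlenEN]⟩)
    case isFalse => exact absurd h (by simp)
  · rintro ⟨e, heR, hnt, hcase⟩
    have hstem : PySem.Chars.slice m none (some (-8)) = e := by
      rw [hslice]
      cases hcase with
      | inl h => have := ((pvEndswith_stem m e "__CN.tex".toList).1 h).2; rw [hlenCN] at this; exact this
      | inr h => have := ((pvEndswith_stem m e "__EN.tex".toList).1 h).2; rw [hlenEN] at this; exact this
    have hew : (PySem.Chars.endswith m "__CN.tex".toList || PySem.Chars.endswith m "__EN.tex".toList) = true := by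
      rw [Bool.or_eq_true, PySem.Chars.endswith_iff, PySem.Chars.endswith_iff]
      cases hcase with
      | inl h => exact Or.inl ⟨e, h.symm⟩
      | inr h => exact Or.inr ⟨e, h.symm⟩
    rw [if_pos hew, Bool.and_eq_true, PySem.Set.contains_iff, hstem]
    exact ⟨heR, by simpa using hnt⟩

-- the whole else-branch of B equals A's loop
theorem pvCore (m : List Char) (R : List (List Char)) :
    pvLoopA m R =
      (if pvLoopB m (PySem.Set.ofList ((R.filter (fun e => !PySem.Chars.endswith e ".tex".toList)).map pvRstripSlash)) (PySem.List.enumerate m 0) then true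
       else if PySem.Chars.endswith m "__CN.tex".toList || PySem.Chars.endswith m "__EN.tex".toList then
         PySem.Set.contains R (PySem.Chars.slice m none (some (-8))) &&
           !PySem.Chars.endswith (PySem.Chars.slice m none (some (-8))) ".tex".toList
       else false) := by
  rw [Bool.eq_iff_iff]
  rw [pvLoopA_eq_any, List.any_eq_true]
  have hsplit : ∀ a b : Bool, (if a then true else b) = true ↔ a = true ∨ b = true := by
    intro a b; cases a <;> simp
  rw [hsplit, pvAnc_iff, pvCn_iff]
  constructor
  · rintro ⟨e, he, hhit⟩
    obtain ⟨hnt, hcase⟩ := (pvHitA_iff m e).1 hhit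
    rcases hcase with h | h | h
    · exact Or.inr ⟨e, he, hnt, Or.inl h⟩
    · exact Or.inr ⟨e, he, hnt, Or.inr h⟩
    · exact Or.inl ⟨e, he, hnt, h⟩
  · rintro (⟨e, he, hnt, hsw⟩ | ⟨e, he, hnt, hcase⟩)
    · exact ⟨e, he, (pvHitA_iff m e).2 ⟨hnt, Or.inr (Or.inr hsw)⟩⟩
    · rcases hcase with h | h
      · exact ⟨e, he, (pvHitA_iff m e).2 ⟨hnt, Or.inl h⟩⟩
      · exact ⟨e, he, (pvHitA_iff m e).2 ⟨hnt, Or.inr (Or.inl h)⟩⟩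

-- ===== VERDICT (by name: the statement is the Claim_ definition above) =====
theorem modification_triggers_backport_spec : Claim_equal_modification_triggers_backport := by
  intro modified reused_paths _
  unfold Spec_modification_triggers_backport
  unfold modification_triggers_backport modification_triggers_backport_alt pvNormalize
  simp only []
  by_cases hmem : PySem.Set.contains (reused_paths.map String.toList)
      (if PySem.Chars.startswith (PySem.Chars.replace modified.toList "\\".toList "/".toList) "./".toList
       then PySem.Chars.replace modified.toList "\\".toList "/".toList
       else "./".toList ++ PySem.Chars.replace modified.toList "\\".toList "/".toList) = true
  · rw [if_pos hmem, if_pos hmem]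
  · rw [if_neg hmem, if_neg hmem]
    exact pvCore _ _
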